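-- pv_equiv track=rewrite | github.com/KehongBeyondMask/PH-EMO | src/main.py | split_stages
-- ===== SOURCE A (Python) =====
-- from typing import Dict, Any, List, Tuple
--
-- def split_stages(stage_text: str) -> Dict[str, str]:
--     out = {"stage1": "", "stage2": "", "stage3": ""}
--     cur = None
--     for line in stage_text.splitlines():
--         l = line.strip()
--         if l.lower().startswith("stage1"):
--             cur = "stage1"; out[cur] += line + "\n"; continue
--         if l.lower().startswith("stage2"):
--             cur = "stage2"; out[cur] += line + "\n"; continue
--         if l.lower().startswith("stage3"):
--             cur = "stage3"; out[cur] += line + "\n"; continue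
--         if cur:
--             out[cur] += line + "\n"
--     return {k: v.strip() for k, v in out.items()}
-- ===== SOURCE B (Python) =====
-- def split_stages(stage_text: str):
--     def header(line):
--         l = line.strip().lower()
--         if l.startswith("stage1"):
--             return "stage1"
--         if l.startswith("stage2"):
--             return "stage2"
--         if l.startswith("stage3"):
--             return "stage3"
--         return None
--
--     def chunks(lines):
--         # list of (stage, block): a block is a header line plus the
--         # following non-header lines; pre-header lines are skipped.
--         if not lines:
--             return []
--         k = header(lines[0])
--         if k is None:
--             return chunks(lines[1:])
--         body = []
--         rest = lines[1:]
--         while rest and header(rest[0]) is None: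
--             body.append(rest[0])
--             rest = rest[1:]
--         return [(k, [lines[0]] + body)] + chunks(rest)
--
--     blocks = {"stage1": [], "stage2": [], "stage3": []}
--     for k, blk in chunks(stage_text.splitlines()):
--         blocks[k].extend(blk)
--     return {k: "\n".join(v).strip() for k, v in blocks.items()}
-- ===== Notes on version B (the rewrite author's own statement) =====
-- stated objective: alternative
-- what changed: A is a single stateful scan that tracks the current stage while appending each line; B first detects the header lines, recursively cuts the text into (stage, block) chunks, concatenates each stage's blocks as line lists, and only joins and strips at the end.
import Mathlib
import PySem

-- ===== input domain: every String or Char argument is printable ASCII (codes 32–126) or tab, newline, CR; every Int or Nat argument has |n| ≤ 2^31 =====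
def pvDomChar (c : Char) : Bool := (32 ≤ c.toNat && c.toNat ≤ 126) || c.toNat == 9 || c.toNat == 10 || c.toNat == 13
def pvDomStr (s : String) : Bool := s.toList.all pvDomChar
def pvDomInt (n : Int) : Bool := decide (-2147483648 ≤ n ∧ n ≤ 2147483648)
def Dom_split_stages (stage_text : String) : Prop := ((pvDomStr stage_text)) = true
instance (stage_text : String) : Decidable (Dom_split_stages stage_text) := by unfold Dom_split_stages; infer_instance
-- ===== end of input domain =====

-- B re-implements the stage splitter by a two-pass chunk decomposition (header detection, then
-- block slicing) instead of A's single stateful scan; objective: alternative decomposition, same cost.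

-- ===== PORT A =====
-- the loop body of A's for-loop (out[cur] += … is ported as insert of getD; the key is always present)
def pvStepA (st : PySem.Dict String String × Option String) (line : String) :
    PySem.Dict String String × Option String :=
  let l := PySem.Str.strip line
  if PySem.Str.startswith (PySem.Str.lower l) "stage1" then
    (st.1.insert "stage1" (st.1.getD "stage1" "" ++ line ++ "\n"), some "stage1")
  else if PySem.Str.startswith (PySem.Str.lower l) "stage2" then
    (st.1.insert "stage2" (st.1.getD "stage2" "" ++ line ++ "\n"), some "stage2")
  else if PySem.Str.startswith (PySem.Str.lower l) "stage3" then
    (st.1.insert "stage3" (st.1.getD "stage3" "" ++ line ++ "\n"), some "stage3")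
  else
    match st.2 with
    | some k => (st.1.insert k (st.1.getD k "" ++ line ++ "\n"), some k)
    | none => st

def split_stages (stage_text : String) : List (String × String) :=
  let out0 : PySem.Dict String String :=
    PySem.Dict.ofList [("stage1", ""), ("stage2", ""), ("stage3", "")]
  let st := (PySem.Str.splitlines stage_text).foldl pvStepA (out0, none)
  st.1.items.map (fun kv => (kv.1, PySem.Str.strip kv.2))

-- ===== PORT B =====
def pvHeader (line : String) : Option String :=
  if PySem.Str.startswith (PySem.Str.lower (PySem.Str.strip line)) "stage1" then some "stage1"
  else if PySem.Str.startswith (PySem.Str.lower (PySem.Str.strip line)) "stage2" then some "stage2"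
  else if PySem.Str.startswith (PySem.Str.lower (PySem.Str.strip line)) "stage3" then some "stage3"
  else none

-- Source B's while-loop collecting the non-header body and leaving the rest is takeWhile/dropWhile;
-- the fuel parameter (initially the list length, enough for every call) only makes the
-- recursion structural, it never cuts the computation short
def pvChunksGo (fuel : Nat) (lines : List String) : List (String × List String) :=
  match fuel with
  | 0 => []
  | fuel + 1 =>
    match lines with
    | [] => []
    | l :: rest =>
      match pvHeader l with
      | none => pvChunksGo fuel rest
      | some k =>
        (k, l :: rest.takeWhile (fun x => (pvHeader x).isNone)) ::
          pvChunksGo fuel (rest.dropWhile (fun x => (pvHeader x).isNone))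

def pvChunks (lines : List String) : List (String × List String) :=
  pvChunksGo lines.length lines

-- blocks[k].extend(blk) ported as insert of getD (the key is always present)
def pvStepB (d : PySem.Dict String (List String)) (kb : String × List String) :
    PySem.Dict String (List String) :=
  d.insert kb.1 (d.getD kb.1 [] ++ kb.2)

def split_stages_alt (stage_text : String) : List (String × String) :=
  let blocks0 : PySem.Dict String (List String) :=
    PySem.Dict.ofList [("stage1", []), ("stage2", []), ("stage3", [])]
  let blocks := (pvChunks (PySem.Str.splitlines stage_text)).foldl pvStepB blocks0
  blocks.items.map (fun kv => (kv.1, PySem.Str.strip (PySem.Str.join "\n" kv.2)))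

-- ===== PRECONDITION & SPEC =====
def Spec_split_stages (stage_text : String) (out : List (String × String)) : Prop := out = split_stages_alt stage_text
instance (stage_text : String) (out : List (String × String)) : Decidable (Spec_split_stages stage_text out) := by unfold Spec_split_stages; infer_instance

-- ===== CLAIM (what is proved, stated in full; the proofs are below) =====
def Claim_equal_split_stages : Prop := ∀ (stage_text : String), Dom_split_stages stage_text → Spec_split_stages stage_text (split_stages stage_text)

-- ===== LEMMAS AND PROOFS =====

-- triple view of the three-key dicts
def pvSet (k : String) (t : String × String × String) (line : String) : String × String × String :=
  if k = "stage1" then (t.1 ++ line ++ "\n", t.2.1, t.2.2)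
  else if k = "stage2" then (t.1, t.2.1 ++ line ++ "\n", t.2.2)
  else (t.1, t.2.1, t.2.2 ++ line ++ "\n")

def runA : List String → Option String → String × String × String → String × String × String
  | [], _, t => t
  | line :: rest, cur, t =>
    match pvHeader line with
    | some k => runA rest (some k) (pvSet k t line)
    | none =>
      match cur with
      | some k => runA rest (some k) (pvSet k t line)
      | none => runA rest none t

def pvApp (s : String) (blk : List String) : String := blk.foldl (fun a l => a ++ l ++ "\n") s

def pvSetBlk (k : String) (t : String × String × String) (blk : List String) :
    String × String × String := blk.foldl (fun t l => pvSet k t l) t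

def pvExt (k : String) (t : List String × List String × List String) (blk : List String) :
    List String × List String × List String :=
  if k = "stage1" then (t.1 ++ blk, t.2.1, t.2.2)
  else if k = "stage2" then (t.1, t.2.1 ++ blk, t.2.2)
  else (t.1, t.2.1, t.2.2 ++ blk)

def runS (chs : List (String × List String)) (t : String × String × String) :
    String × String × String := chs.foldl (fun t kb => pvSetBlk kb.1 t kb.2) t

def runB (chs : List (String × List String)) (t : List String × List String × List String) :
    List String × List String × List String := chs.foldl (fun t kb => pvExt kb.1 t kb.2) t

lemma pvHeader_cases (line : String) (k : String) (h : pvHeader line = some k) :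
    k = "stage1" ∨ k = "stage2" ∨ k = "stage3" := by
  unfold pvHeader at h
  split_ifs at h <;> simp_all

-- A's fold over the dict is the triple machine runA
lemma A_fold_triple (lines : List String) :
    ∀ (s1 s2 s3 : String) (cur : Option String),
    (cur = none ∨ cur = some "stage1" ∨ cur = some "stage2" ∨ cur = some "stage3") →
    (lines.foldl pvStepA (PySem.Dict.mk [("stage1", s1), ("stage2", s2), ("stage3", s3)], cur)).1
      = PySem.Dict.mk [("stage1", (runA lines cur (s1, s2, s3)).1),
                       ("stage2", (runA lines cur (s1, s2, s3)).2.1),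
                       ("stage3", (runA lines cur (s1, s2, s3)).2.2)] := by
  induction lines with
  | nil => intro s1 s2 s3 cur _; simp [runA]
  | cons line rest ih =>
    intro s1 s2 s3 cur hcur
    by_cases h1 : PySem.Str.startswith (PySem.Str.lower (PySem.Str.strip line)) "stage1" = true
    · have hh : pvHeader line = some "stage1" := by unfold pvHeader; rw [if_pos h1]
      have hstep : pvStepA (PySem.Dict.mk [("stage1", s1), ("stage2", s2), ("stage3", s3)], cur) line
          = (PySem.Dict.mk [("stage1", s1 ++ line ++ "\n"), ("stage2", s2), ("stage3", s3)],
             some "stage1") := by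
        unfold pvStepA; rw [if_pos h1]
        simp [PySem.Dict.insert, PySem.Dict.getD, PySem.Dict.get?]
      have hrun : runA (line :: rest) cur (s1, s2, s3)
          = runA rest (some "stage1") (s1 ++ line ++ "\n", s2, s3) := by
        simp only [runA, hh]; simp [pvSet]
      rw [List.foldl_cons, hstep, ih _ _ _ _ (Or.inr (Or.inl rfl)), hrun]
    · by_cases h2 : PySem.Str.startswith (PySem.Str.lower (PySem.Str.strip line)) "stage2" = true
      · have hh : pvHeader line = some "stage2" := by
          unfold pvHeader; rw [if_neg h1, if_pos h2]
        have hstep : pvStepA (PySem.Dict.mk [("stage1", s1), ("stage2", s2), ("stage3", s3)], cur) line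
            = (PySem.Dict.mk [("stage1", s1), ("stage2", s2 ++ line ++ "\n"), ("stage3", s3)],
               some "stage2") := by
          unfold pvStepA; rw [if_neg h1, if_pos h2]
          simp [PySem.Dict.insert, PySem.Dict.getD, PySem.Dict.get?]
        have hrun : runA (line :: rest) cur (s1, s2, s3)
            = runA rest (some "stage2") (s1, s2 ++ line ++ "\n", s3) := by
          simp only [runA, hh]; simp [pvSet]
        rw [List.foldl_cons, hstep, ih _ _ _ _ (Or.inr (Or.inr (Or.inl rfl))), hrun]
      · by_cases h3 : PySem.Str.startswith (PySem.Str.lower (PySem.Str.strip line)) "stage3" = true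
        · have hh : pvHeader line = some "stage3" := by
            unfold pvHeader; rw [if_neg h1, if_neg h2, if_pos h3]
          have hstep : pvStepA (PySem.Dict.mk [("stage1", s1), ("stage2", s2), ("stage3", s3)], cur) line
              = (PySem.Dict.mk [("stage1", s1), ("stage2", s2), ("stage3", s3 ++ line ++ "\n")],
                 some "stage3") := by
            unfold pvStepA; rw [if_neg h1, if_neg h2, if_pos h3]
            simp [PySem.Dict.insert, PySem.Dict.getD, PySem.Dict.get?]
          have hrun : runA (line :: rest) cur (s1, s2, s3)
              = runA rest (some "stage3") (s1, s2, s3 ++ line ++ "\n") := by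
            simp only [runA, hh]; simp [pvSet]
          rw [List.foldl_cons, hstep, ih _ _ _ _ (Or.inr (Or.inr (Or.inr rfl))), hrun]
        · have hh : pvHeader line = none := by
            unfold pvHeader; rw [if_neg h1, if_neg h2, if_neg h3]
          rcases hcur with hc | hc | hc | hc <;> subst hc
          · have hstep : pvStepA (PySem.Dict.mk [("stage1", s1), ("stage2", s2), ("stage3", s3)], none) line
                = (PySem.Dict.mk [("stage1", s1), ("stage2", s2), ("stage3", s3)], none) := by
              unfold pvStepA; rw [if_neg h1, if_neg h2, if_neg h3]
            have hrun : runA (line :: rest) none (s1, s2, s3) = runA rest none (s1, s2, s3) := by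
              simp only [runA, hh]
            rw [List.foldl_cons, hstep, ih _ _ _ _ (Or.inl rfl), hrun]
          · have hstep : pvStepA (PySem.Dict.mk [("stage1", s1), ("stage2", s2), ("stage3", s3)], some "stage1") line
                = (PySem.Dict.mk [("stage1", s1 ++ line ++ "\n"), ("stage2", s2), ("stage3", s3)],
                   some "stage1") := by
              unfold pvStepA; rw [if_neg h1, if_neg h2, if_neg h3]
              simp [PySem.Dict.insert, PySem.Dict.getD, PySem.Dict.get?]
            have hrun : runA (line :: rest) (some "stage1") (s1, s2, s3)
                = runA rest (some "stage1") (s1 ++ line ++ "\n", s2, s3) := by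
              simp only [runA, hh]; simp [pvSet]
            rw [List.foldl_cons, hstep, ih _ _ _ _ (Or.inr (Or.inl rfl)), hrun]
          · have hstep : pvStepA (PySem.Dict.mk [("stage1", s1), ("stage2", s2), ("stage3", s3)], some "stage2") line
                = (PySem.Dict.mk [("stage1", s1), ("stage2", s2 ++ line ++ "\n"), ("stage3", s3)],
                   some "stage2") := by
              unfold pvStepA; rw [if_neg h1, if_neg h2, if_neg h3]
              simp [PySem.Dict.insert, PySem.Dict.getD, PySem.Dict.get?]
            have hrun : runA (line :: rest) (some "stage2") (s1, s2, s3)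
                = runA rest (some "stage2") (s1, s2 ++ line ++ "\n", s3) := by
              simp only [runA, hh]; simp [pvSet]
            rw [List.foldl_cons, hstep, ih _ _ _ _ (Or.inr (Or.inr (Or.inl rfl))), hrun]
          · have hstep : pvStepA (PySem.Dict.mk [("stage1", s1), ("stage2", s2), ("stage3", s3)], some "stage3") line
                = (PySem.Dict.mk [("stage1", s1), ("stage2", s2), ("stage3", s3 ++ line ++ "\n")],
                   some "stage3") := by
              unfold pvStepA; rw [if_neg h1, if_neg h2, if_neg h3]
              simp [PySem.Dict.insert, PySem.Dict.getD, PySem.Dict.get?]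
            have hrun : runA (line :: rest) (some "stage3") (s1, s2, s3)
                = runA rest (some "stage3") (s1, s2, s3 ++ line ++ "\n") := by
              simp only [runA, hh]; simp [pvSet]
            rw [List.foldl_cons, hstep, ih _ _ _ _ (Or.inr (Or.inr (Or.inr rfl))), hrun]

-- every chunk key is one of the three stage keys
lemma pvChunksGo_keys : ∀ (fuel : Nat) (lines : List String),
    ∀ kb ∈ pvChunksGo fuel lines, kb.1 = "stage1" ∨ kb.1 = "stage2" ∨ kb.1 = "stage3" := by
  intro fuel
  induction fuel with
  | zero => intro lines kb hm; simp [pvChunksGo] at hm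
  | succ fuel ih =>
    intro lines kb hm
    cases lines with
    | nil => simp [pvChunksGo] at hm
    | cons l rest =>
      cases hh : pvHeader l with
      | none =>
        simp only [pvChunksGo, hh] at hm
        exact ih rest kb hm
      | some k =>
        simp only [pvChunksGo, hh] at hm
        rcases List.mem_cons.mp hm with h' | h'
        · subst h'; exact pvHeader_cases l k hh
        · exact ih _ kb h'

lemma pvChunks_keys (lines : List String) :
    ∀ kb ∈ pvChunks lines, kb.1 = "stage1" ∨ kb.1 = "stage2" ∨ kb.1 = "stage3" :=
  pvChunksGo_keys lines.length lines

-- B's fold over the dict is the triple machine runB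
lemma B_fold_triple (chs : List (String × List String)) :
    ∀ (l1 l2 l3 : List String),
    (∀ kb ∈ chs, kb.1 = "stage1" ∨ kb.1 = "stage2" ∨ kb.1 = "stage3") →
    chs.foldl pvStepB (PySem.Dict.mk [("stage1", l1), ("stage2", l2), ("stage3", l3)])
      = PySem.Dict.mk [("stage1", (runB chs (l1, l2, l3)).1),
                       ("stage2", (runB chs (l1, l2, l3)).2.1),
                       ("stage3", (runB chs (l1, l2, l3)).2.2)] := by
  induction chs with
  | nil => intro l1 l2 l3 _; simp [runB]
  | cons kb rest ih =>
    intro l1 l2 l3 hk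
    have hkb := hk kb (List.mem_cons_self ..)
    have hrest : ∀ kb ∈ rest, kb.1 = "stage1" ∨ kb.1 = "stage2" ∨ kb.1 = "stage3" :=
      fun x hx => hk x (List.mem_cons_of_mem _ hx)
    rcases hkb with h | h | h <;>
      · simp only [List.foldl_cons, pvStepB, h]
        simp [PySem.Dict.insert, PySem.Dict.getD, PySem.Dict.get?]
        rw [ih _ _ _ hrest]
        simp [runB, pvExt, h]

-- the stateful scan with cur = some k absorbs the following non-header lines (Source B's while loop)
lemma runA_absorb (rest : List String) :
    ∀ (k : String) (t : String × String × String),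
    runA rest (some k) t
      = runA (rest.dropWhile (fun x => (pvHeader x).isNone)) (some k)
          (pvSetBlk k t (rest.takeWhile (fun x => (pvHeader x).isNone))) := by
  induction rest with
  | nil => intro k t; simp [pvSetBlk]
  | cons x r ih =>
    intro k t
    cases hx : pvHeader x with
    | none =>
      simp only [List.takeWhile_cons, List.dropWhile_cons, hx, Option.isNone_none]
      simp only [pvSetBlk]
      rw [show runA (x :: r) (some k) t = runA r (some k) (pvSet k t x) by simp [runA, hx]]
      exact ih k (pvSet k t x)
    | some k' =>
      simp [hx, pvSetBlk]

-- on a list whose head is a header (or an empty list), cur is irrelevant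
lemma runA_cur_irrel (x : List String) (k : String) (t : String × String × String)
    (hx : x = [] ∨ ∃ h r k', x = h :: r ∧ pvHeader h = some k') :
    runA x (some k) t = runA x none t := by
  rcases hx with h | ⟨h, r, k', rfl, hh⟩
  · subst h; rfl
  · simp [runA, hh]

-- core: A's stateful scan equals the chunk decomposition
lemma runA_chunksGo : ∀ (fuel : Nat) (lines : List String), lines.length ≤ fuel →
    ∀ (t : String × String × String), runA lines none t = runS (pvChunksGo fuel lines) t := by
  intro fuel
  induction fuel with
  | zero =>
    intro lines hlen t
    have hnil : lines = [] := List.eq_nil_of_length_eq_zero (Nat.le_zero.mp hlen)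
    subst hnil
    simp [pvChunksGo, runS, runA]
  | succ fuel ih =>
    intro lines hlen t
    cases lines with
    | nil => simp [pvChunksGo, runS, runA]
    | cons l rest =>
      have hrest : rest.length ≤ fuel := by
        simp only [List.length_cons] at hlen; omega
      cases hh : pvHeader l with
      | none =>
        rw [show runA (l :: rest) none t = runA rest none t by simp [runA, hh]]
        simp only [pvChunksGo, hh]
        exact ih rest hrest t
      | some k =>
        rw [show runA (l :: rest) none t = runA rest (some k) (pvSet k t l) by simp [runA, hh]]
        rw [runA_absorb]
        simp only [pvChunksGo, hh]
        have hdrop : rest.dropWhile (fun x => (pvHeader x).isNone) = [] ∨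
            ∃ hh r k', rest.dropWhile (fun x => (pvHeader x).isNone) = hh :: r ∧ pvHeader hh = some k' := by
          cases hd : rest.dropWhile (fun x => (pvHeader x).isNone) with
          | nil => exact Or.inl rfl
          | cons hh r =>
            have hw : rest.dropWhile (fun x => (pvHeader x).isNone) ≠ [] := by simp [hd]
            have hfalse := List.head_dropWhile_not (fun x => (pvHeader x).isNone) hw
            simp only [hd, List.head_cons] at hfalse
            cases hph : pvHeader hh with
            | none => rw [hph] at hfalse; simp at hfalse
            | some k' => exact Or.inr ⟨hh, r, k', rfl, hph⟩
        rw [runA_cur_irrel _ k _ hdrop]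
        rw [ih _ (Nat.le_trans (List.length_dropWhile_le _ _) hrest)]
        simp [runS, pvSetBlk]

lemma runA_chunks (lines : List String) : ∀ (t : String × String × String),
    runA lines none t = runS (pvChunks lines) t :=
  runA_chunksGo lines.length lines (Nat.le_refl _)

-- pvSetBlk in slot form
lemma pvSetBlk_eq (blk : List String) : ∀ (k : String) (t : String × String × String),
    pvSetBlk k t blk =
      if k = "stage1" then (pvApp t.1 blk, t.2.1, t.2.2)
      else if k = "stage2" then (t.1, pvApp t.2.1 blk, t.2.2)
      else (t.1, t.2.1, pvApp t.2.2 blk) := by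
  induction blk with
  | nil => intro k t; split_ifs <;> simp [pvSetBlk, pvApp]
  | cons x r ih =>
    intro k t
    simp only [pvSetBlk, List.foldl_cons] at *
    rw [ih]
    unfold pvSet
    split_ifs <;> simp [pvApp]

-- the string accumulators track the list accumulators
lemma runS_runB (chs : List (String × List String)) :
    ∀ (L1 L2 L3 : List String),
    runS chs (pvApp "" L1, pvApp "" L2, pvApp "" L3)
      = (pvApp "" (runB chs (L1, L2, L3)).1,
         pvApp "" (runB chs (L1, L2, L3)).2.1,
         pvApp "" (runB chs (L1, L2, L3)).2.2) := by
  induction chs with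
  | nil => intro L1 L2 L3; simp [runS, runB]
  | cons kb rest ih =>
    intro L1 L2 L3
    simp only [runS, runB, List.foldl_cons] at *
    rw [pvSetBlk_eq]
    unfold pvExt
    split_ifs <;>
      · rw [show ∀ L b, pvApp (pvApp "" L) b = pvApp "" (L ++ b) from
          fun L b => (List.foldl_append ..).symm]
        exact ih ..

lemma rstrip_newline (cs : List Char) :
    PySem.Chars.rstrip (cs ++ ['\n']) = PySem.Chars.rstrip cs := by
  unfold PySem.Chars.rstrip
  rw [List.reverse_append]
  simp [show PySem.Chars.isspace '\n' = true from by decide]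

lemma strip_newline (cs : List Char) :
    PySem.Chars.strip (cs ++ ['\n']) = PySem.Chars.strip cs := by
  unfold PySem.Chars.strip PySem.Chars.lstrip
  rw [List.dropWhile_append]
  split_ifs with h
  · have h' : List.dropWhile PySem.Chars.isspace cs = [] := by simpa using h
    simp [h', show PySem.Chars.isspace '\n' = true from by decide, PySem.Chars.rstrip]
  · exact rstrip_newline _

lemma foldl_nl_join (ls : List (List Char)) (hne : ls ≠ []) : ∀ (a : List Char),
    ls.foldl (fun a l => a ++ l ++ ['\n']) a = a ++ PySem.Chars.join ['\n'] ls ++ ['\n'] := by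
  induction ls with
  | nil => exact absurd rfl hne
  | cons x r ih =>
    intro a
    cases r with
    | nil => rw [List.foldl_cons, List.foldl_nil, PySem.Chars.join_singleton]
    | cons y t =>
      rw [List.foldl_cons, ih (by simp) _, PySem.Chars.join_cons_cons]
      simp

lemma toList_pvApp (L : List String) : ∀ (s : String),
    (pvApp s L).toList = (L.map String.toList).foldl (fun a l => a ++ l ++ ['\n']) s.toList := by
  induction L with
  | nil => intro s; simp [pvApp]
  | cons x r ih =>
    intro s
    simp only [pvApp, List.foldl_cons, List.map_cons] at *
    rw [ih]
    simp [String.toList_append]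

-- final per-stage bridge: "".join-style accumulation then strip = "\n".join then strip
lemma strip_pvApp_join (L : List String) :
    PySem.Str.strip (pvApp "" L) = PySem.Str.strip (PySem.Str.join "\n" L) := by
  apply String.toList_inj.mp
  rw [PySem.Str.toList_strip, PySem.Str.toList_strip, PySem.Str.toList_join, toList_pvApp]
  rw [show ("\n" : String).toList = ['\n'] from rfl]
  rw [show ("" : String).toList = ([] : List Char) from rfl]
  cases hL : L.map String.toList with
  | nil => rw [PySem.Chars.join_nil]; rfl
  | cons x r =>
    rw [foldl_nl_join (x :: r) (by simp) [], List.nil_append, strip_newline]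

-- ===== VERDICT (by name: the statement is the Claim_ definition above) =====
theorem split_stages_spec : Claim_equal_split_stages := by
  intro stage_text _
  unfold Spec_split_stages split_stages split_stages_alt
  dsimp only
  have h0 : (PySem.Dict.ofList [("stage1", ""), ("stage2", ""), ("stage3", "")] :
      PySem.Dict String String) = PySem.Dict.mk [("stage1", ""), ("stage2", ""), ("stage3", "")] := by
    decide
  have h0' : (PySem.Dict.ofList [("stage1", ([] : List String)), ("stage2", []), ("stage3", [])] :
      PySem.Dict String (List String)) = PySem.Dict.mk [("stage1", []), ("stage2", []), ("stage3", [])] := by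
    decide
  rw [h0, h0']
  rw [A_fold_triple _ "" "" "" none (Or.inl rfl)]
  rw [B_fold_triple _ [] [] [] (pvChunks_keys _)]
  rw [runA_chunks]
  have : ("" : String) = pvApp "" [] := rfl
  rw [show (("" : String), ("" : String), ("" : String))
        = (pvApp "" [], pvApp "" [], pvApp "" []) from rfl]
  rw [runS_runB]
  simp [strip_pvApp_join]
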